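-- pv_equiv track=rewrite | github.com/gudkeshkumar/DSA_Python | Arrays.py | sumHighestAndLowestFrequency
-- ===== SOURCE A (Python) =====
-- def sumHighestAndLowestFrequency(nums):
--     n = len(nums)
--
--     maxFreq = 0
--     minFreq = n
--     visited = [False] * n
--
--     for i in range(n):
--         if visited[i]:
--             continue
--
--         freq = 0
--         for j in range(i, n):
--             if nums[i] == nums[j]:
--                 freq += 1
--                 visited[j] = True
--
--         maxFreq = max(maxFreq, freq)
--         minFreq = min(minFreq, freq)
--     return maxFreq+minFreq
-- ===== SOURCE B (Python) =====
-- def sumHighestAndLowestFrequency(nums):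
--     if not nums:
--         return 0
--     counts = {}
--     for x in nums:
--         counts[x] = counts.get(x, 0) + 1
--     vals = list(counts.values())
--     return max(vals) + min(vals)
-- ===== Notes on version B (the rewrite author's own statement) =====
-- stated objective: faster
-- what changed: Replaces the quadratic visited-array double scan with a single pass that builds a value->frequency dict and then takes max+min of its values.
import Mathlib
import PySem

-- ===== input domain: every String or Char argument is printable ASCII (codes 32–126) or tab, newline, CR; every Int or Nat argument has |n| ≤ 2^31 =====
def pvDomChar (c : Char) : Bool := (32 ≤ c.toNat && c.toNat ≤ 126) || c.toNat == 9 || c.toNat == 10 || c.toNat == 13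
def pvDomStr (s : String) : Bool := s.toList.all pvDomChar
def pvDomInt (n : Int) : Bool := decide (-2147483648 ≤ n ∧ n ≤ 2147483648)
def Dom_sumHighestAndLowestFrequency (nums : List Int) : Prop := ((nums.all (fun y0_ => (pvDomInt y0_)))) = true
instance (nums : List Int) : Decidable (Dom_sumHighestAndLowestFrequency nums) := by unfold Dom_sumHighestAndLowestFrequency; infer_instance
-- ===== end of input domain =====

-- B replaces A's quadratic visited-array double scan by one counting pass over a dict plus max+min of its values (measured faster asymptotically); return values agree on every input.

-- ===== PORT A =====
-- inner loop body: 'for j in range(i, n): if nums[i] == nums[j]: freq += 1; visited[j] = True'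
def pvAInner (nums : List Int) (i : Int) (fv : Int × List Bool) (j : Int) : Int × List Bool :=
  if PySem.List.pyGetD nums i 0 == PySem.List.pyGetD nums j 0 then
    (fv.1 + 1, PySem.List.pySetD fv.2 j true)
  else fv

-- outer loop body over state (maxFreq, minFreq, visited)
def pvAOuter (nums : List Int) (st : Int × Int × List Bool) (i : Int) : Int × Int × List Bool :=
  if PySem.List.pyGetD st.2.2 i false then st
  else
    let fv := (PySem.List.pyRange i (nums.length : Int) 1).foldl (pvAInner nums i) ((0 : Int), st.2.2)
    (max st.1 fv.1, min st.2.1 fv.1, fv.2)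

def sumHighestAndLowestFrequency (nums : List Int) : Int :=
  let n : Int := nums.length
  let st := (PySem.List.pyRange 0 n 1).foldl (pvAOuter nums)
      ((0 : Int), n, List.replicate nums.length false)
  st.1 + st.2.1

-- ===== PORT B =====
def sumHighestAndLowestFrequency_alt (nums : List Int) : Int :=
  if nums = [] then 0
  else
    -- counts[x] = counts.get(x, 0) + 1 over nums
    let counts := nums.foldl (fun d x => d.insert x (d.getD x 0 + 1))
        (PySem.Dict.empty : PySem.Dict Int Int)
    let vals := counts.values
    -- max(vals) + min(vals); vals is nonempty here since nums ≠ []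
    (PySem.List.max? vals (fun v => v)).getD 0 + (PySem.List.min? vals (fun v => v)).getD 0

-- ===== PRECONDITION & SPEC =====
def Spec_sumHighestAndLowestFrequency (nums : List Int) (out : Int) : Prop := out = sumHighestAndLowestFrequency_alt nums
instance (nums : List Int) (out : Int) : Decidable (Spec_sumHighestAndLowestFrequency nums out) := by unfold Spec_sumHighestAndLowestFrequency; infer_instance

-- ===== CLAIM (what is proved, stated in full; the proofs are below) =====
def Claim_equal_sumHighestAndLowestFrequency : Prop := ∀ (nums : List Int), Dom_sumHighestAndLowestFrequency nums → Spec_sumHighestAndLowestFrequency nums (sumHighestAndLowestFrequency nums)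

-- ===== LEMMAS AND PROOFS =====

-- the sequence of frequencies A's outer loop records: walking suf with already-seen prefix pre
def pvEmit (nums : List Int) : List Int → List Int → List Int
  | _, [] => []
  | pre, y :: suf =>
    if y ∈ pre then pvEmit nums (pre ++ [y]) suf
    else ((nums.count y : Int)) :: pvEmit nums (pre ++ [y]) suf

theorem foldl_add_filter_ne (y : Int) : ∀ (l s : List Int), y ∈ s →
    l.foldl PySem.Set.add s = (l.filter (fun z => !(z == y))).foldl PySem.Set.add s := by
  intro l
  induction l with
  | nil => intro s _; rfl
  | cons z l ih =>
    intro s hy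
    by_cases hz : z = y
    · subst hz
      simp only [List.filter_cons, beq_self_eq_true, Bool.not_true, if_neg, List.foldl_cons,
        PySem.Set.add_of_mem hy, Bool.false_eq_true, ite_false]
      exact ih s hy
    · have : (!(z == y)) = true := by simp [hz]
      simp only [List.filter_cons, this, if_pos, List.foldl_cons]
      exact ih (PySem.Set.add s z) ((PySem.Set.mem_add s z y).mpr (Or.inl hy))

theorem foldl_add_cons (y : Int) : ∀ (l s : List Int), y ∉ l →
    l.foldl PySem.Set.add (y :: s) = y :: l.foldl PySem.Set.add s := by
  intro l
  induction l with
  | nil => intro s _; rfl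
  | cons z l ih =>
    intro s hzl
    have hz : z ≠ y := fun h => hzl (by simp [h])
    have hstep : PySem.Set.add (y :: s) z = y :: PySem.Set.add s z := by
      by_cases hmem : z ∈ s
      · rw [PySem.Set.add_of_mem (by simp [hmem]), PySem.Set.add_of_mem hmem]
      · rw [PySem.Set.add_of_not_mem (by simp [hz, hmem]), PySem.Set.add_of_not_mem hmem]
        rfl
    simp only [List.foldl_cons, hstep]
    exact ih (PySem.Set.add s z) (fun h => hzl (by simp [h]))

theorem ofList_cons_filter (y : Int) (l : List Int) :
    PySem.Set.ofList (y :: l) = y :: PySem.Set.ofList (l.filter (fun z => !(z == y))) := by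
  rw [PySem.Set.ofList_eq_foldl, List.foldl_cons]
  have h0 : PySem.Set.add ([] : List Int) y = [y] := rfl
  rw [h0, foldl_add_filter_ne y l [y] (List.mem_singleton_self y),
    foldl_add_cons y _ [] (by simp), PySem.Set.ofList_eq_foldl]

theorem inner_spec (nums : List Int) (i : Int) :
    ∀ (suf pre : List Int) (f0 : Int) (v : List Bool),
      nums = pre ++ suf → v.length = nums.length →
      ((PySem.List.pyRange (pre.length : Int) (nums.length : Int) 1).foldl (pvAInner nums i) (f0, v)).1
        = f0 + suf.countP (fun y => PySem.List.pyGetD nums i 0 == y) ∧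
      ((PySem.List.pyRange (pre.length : Int) (nums.length : Int) 1).foldl (pvAInner nums i) (f0, v)).2.length
        = nums.length ∧
      ∀ j : Nat,
        ((PySem.List.pyRange (pre.length : Int) (nums.length : Int) 1).foldl (pvAInner nums i) (f0, v)).2.getD j false
          = (v.getD j false ||
             (decide (pre.length ≤ j ∧ j < nums.length) && (PySem.List.pyGetD nums i 0 == nums.getD j 0))) := by
  intro suf
  induction suf with
  | nil =>
    intro pre f0 v hsplit hlen
    have hn : nums.length = pre.length := by simp [hsplit]
    have hr : PySem.List.pyRange (pre.length : Int) (nums.length : Int) 1 = [] := by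
      rw [hn]; simp [pysem]
    rw [hr]
    refine ⟨by simp, by simpa using hlen, ?_⟩
    intro j
    have : (decide (pre.length ≤ j ∧ j < nums.length)) = false := by
      simp only [decide_eq_false_iff_not]; omega
    simp [this]
  | cons y suf ih =>
    intro pre f0 v hsplit hlen
    have hn : nums.length = pre.length + suf.length + 1 := by simp [hsplit]; omega
    have hlt : (pre.length : Int) < (nums.length : Int) := by exact_mod_cast (by omega : pre.length < nums.length)
    have hy : PySem.List.pyGetD nums ((pre.length : Nat) : Int) 0 = y := by
      rw [PySem.List.pyGetD_natCast, hsplit]; simp [List.getD]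
    have hsplit' : nums = (pre ++ [y]) ++ suf := by rw [hsplit]; simp
    have hcast : (pre.length : Int) + 1 = (((pre ++ [y]).length : Nat) : Int) := by simp
    rw [PySem.List.pyRange_one_cons hlt, List.foldl_cons]
    by_cases hxy : PySem.List.pyGetD nums i 0 = y
    · have hstep : pvAInner nums i (f0, v) ((pre.length : Nat) : Int) =
          (f0 + 1, v.set pre.length true) := by
        rw [pvAInner, hy, if_pos (by simp [hxy]), PySem.List.pySetD_natCast]
      rw [hstep, hcast]
      obtain ⟨h1, h2, h3⟩ := ih (pre ++ [y]) (f0 + 1) (v.set pre.length true) hsplit' (by simpa using hlen)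
      refine ⟨?_, h2, ?_⟩
      · rw [h1, List.countP_cons]
        simp [hxy]
        omega
      · intro j
        rw [h3 j]
        by_cases hj : j = pre.length
        · subst hj
          have hvlen : pre.length < v.length := by omega
          have hset : (v.set pre.length true).getD pre.length false = true := by
            simp [List.getD, hvlen]
          have hnum : nums.getD pre.length 0 = y := by rw [hsplit]; simp [List.getD]
          have hdec : (decide (pre.length ≤ pre.length ∧ pre.length < nums.length)) = true := by
            simp; omega
          rw [hset, hnum, hdec]
          simp [hxy]
        · have hset : (v.set pre.length true).getD j false = v.getD j false := by
            simp [List.getD, Ne.symm hj]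
          rw [hset]
          have : (decide ((pre ++ [y]).length ≤ j ∧ j < nums.length))
              = decide (pre.length ≤ j ∧ j < nums.length) := by
            apply decide_eq_decide.mpr; simp; omega
          rw [this]
    · have hstep : pvAInner nums i (f0, v) ((pre.length : Nat) : Int) = (f0, v) := by
        rw [pvAInner, hy, if_neg (by simp [hxy])]
      rw [hstep, hcast]
      obtain ⟨h1, h2, h3⟩ := ih (pre ++ [y]) f0 v hsplit' hlen
      refine ⟨?_, h2, ?_⟩
      · rw [h1, List.countP_cons]
        simp [hxy]
      · intro j
        rw [h3 j]
        by_cases hj : j = pre.length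
        · subst hj
          have hnum : nums.getD pre.length 0 = y := by
            rw [hsplit]; simp [List.getD]
          have : (decide ((pre ++ [y]).length ≤ pre.length ∧ pre.length < nums.length)) = false := by
            simp only [decide_eq_false_iff_not]
            rintro ⟨h1, -⟩
            simp at h1
          rw [this, hnum]
          simp [hxy]
        · have : (decide ((pre ++ [y]).length ≤ j ∧ j < nums.length))
              = decide (pre.length ≤ j ∧ j < nums.length) := by
            apply decide_eq_decide.mpr; simp; omega
          rw [this]

theorem emit_eq (nums : List Int) :
    ∀ (suf pre : List Int),
      pvEmit nums pre suf
        = (PySem.Set.ofList (suf.filter (fun y => !decide (y ∈ pre)))).map (fun x => (nums.count x : Int)) := by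
  intro suf
  induction suf with
  | nil => intro pre; rfl
  | cons y suf ih =>
    intro pre
    have hfilt : ∀ (l : List Int), l.filter (fun z => !decide (z ∈ pre ++ [y])) =
        (l.filter (fun z => !decide (z ∈ pre))).filter (fun z => !(z == y)) := by
      intro l
      rw [List.filter_filter]
      apply List.filter_congr
      intro z _
      by_cases h1 : z ∈ pre <;> by_cases h2 : z = y <;> simp [h1, h2]
    by_cases hy : y ∈ pre
    · have hdrop : (y :: suf).filter (fun z => !decide (z ∈ pre)) = suf.filter (fun z => !decide (z ∈ pre)) := by
        simp [List.filter_cons, hy]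
      rw [pvEmit, if_pos hy, ih (pre ++ [y]), hdrop]
      congr 2
      rw [hfilt suf]
      apply List.filter_eq_self.mpr
      intro z hz
      have := List.of_mem_filter hz
      simp only [Bool.not_eq_true', decide_eq_false_iff_not] at this
      simp only [Bool.not_eq_true', beq_eq_false_iff_ne, ne_eq]
      intro h; exact this (h ▸ hy)
    · have hkeep : (y :: suf).filter (fun z => !decide (z ∈ pre)) = y :: suf.filter (fun z => !decide (z ∈ pre)) := by
        simp [List.filter_cons, hy]
      rw [pvEmit, if_neg hy, hkeep, ofList_cons_filter, List.map_cons, ih (pre ++ [y]), hfilt suf]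

theorem outer_spec (nums : List Int) :
    ∀ (suf pre : List Int) (mx mn : Int) (v : List Bool),
      nums = pre ++ suf → v.length = nums.length →
      (∀ j : Nat, v.getD j false = decide (j < nums.length ∧ nums.getD j 0 ∈ pre)) →
      ((PySem.List.pyRange (pre.length : Int) (nums.length : Int) 1).foldl (pvAOuter nums) (mx, mn, v)).1
        = (pvEmit nums pre suf).foldl max mx ∧
      ((PySem.List.pyRange (pre.length : Int) (nums.length : Int) 1).foldl (pvAOuter nums) (mx, mn, v)).2.1
        = (pvEmit nums pre suf).foldl min mn := by
  intro suf
  induction suf with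
  | nil =>
    intro pre mx mn v hsplit hlen hinv
    have hn : nums.length = pre.length := by simp [hsplit]
    have hr : PySem.List.pyRange (pre.length : Int) (nums.length : Int) 1 = [] := by
      rw [hn]; simp [pysem]
    rw [hr]
    exact ⟨rfl, rfl⟩
  | cons y suf ih =>
    intro pre mx mn v hsplit hlen hinv
    have hn : nums.length = pre.length + suf.length + 1 := by simp [hsplit]; omega
    have hlt : (pre.length : Int) < (nums.length : Int) := by
      exact_mod_cast (by omega : pre.length < nums.length)
    have hnum : nums.getD pre.length 0 = y := by rw [hsplit]; simp [List.getD]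
    have hsplit' : nums = (pre ++ [y]) ++ suf := by rw [hsplit]; simp
    have hcast : (pre.length : Int) + 1 = (((pre ++ [y]).length : Nat) : Int) := by simp
    have htest : PySem.List.pyGetD v ((pre.length : Nat) : Int) false = decide (y ∈ pre) := by
      rw [PySem.List.pyGetD_natCast, hinv pre.length, hnum]
      apply decide_eq_decide.mpr
      constructor
      · exact fun h => h.2
      · exact fun h => ⟨by omega, h⟩
    rw [PySem.List.pyRange_one_cons hlt, List.foldl_cons]
    by_cases hy : y ∈ pre
    · have hstep : pvAOuter nums (mx, mn, v) ((pre.length : Nat) : Int) = (mx, mn, v) := by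
        rw [pvAOuter, htest, if_pos (by simp [hy])]
      rw [hstep, hcast]
      have hinv' : ∀ j : Nat, v.getD j false = decide (j < nums.length ∧ nums.getD j 0 ∈ pre ++ [y]) := by
        intro j
        rw [hinv j]
        apply decide_eq_decide.mpr
        constructor
        · rintro ⟨hj, hm⟩; exact ⟨hj, List.mem_append.mpr (Or.inl hm)⟩
        · rintro ⟨hj, hm⟩
          rcases List.mem_append.mp hm with h | h
          · exact ⟨hj, h⟩
          · exact ⟨hj, by rw [List.mem_singleton.mp h]; exact hy⟩
      have := ih (pre ++ [y]) mx mn v hsplit' hlen hinv'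
      rw [pvEmit, if_pos hy]
      exact this
    · have hx : PySem.List.pyGetD nums ((pre.length : Nat) : Int) 0 = y := by
        rw [PySem.List.pyGetD_natCast, hsplit]; simp [List.getD]
      obtain ⟨h1, h2, h3⟩ :=
        inner_spec nums ((pre.length : Nat) : Int) (y :: suf) pre 0 v hsplit hlen
      have hcnt : ((PySem.List.pyRange ((pre.length : Nat) : Int) (nums.length : Int) 1).foldl
          (pvAInner nums ((pre.length : Nat) : Int)) (0, v)).1 = (nums.count y : Int) := by
        rw [h1, hx]
        have hc : (y :: suf).countP (fun z => y == z) = (y :: suf).count y := by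
          apply List.countP_congr
          intro z _
          simp
          exact eq_comm
        rw [hc]
        have hcount : nums.count y = (y :: suf).count y := by
          rw [hsplit, List.count_append, List.count_eq_zero.mpr hy]
          omega
        rw [hcount]
        push_cast
        omega
      have hinv' : ∀ j : Nat,
          ((PySem.List.pyRange ((pre.length : Nat) : Int) (nums.length : Int) 1).foldl
            (pvAInner nums ((pre.length : Nat) : Int)) (0, v)).2.getD j false
            = decide (j < nums.length ∧ nums.getD j 0 ∈ pre ++ [y]) := by
        intro j
        rw [h3 j, hinv j, hx]
        by_cases hjn : j < nums.length
        · by_cases hjp : j < pre.length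
          · have hmem : nums.getD j 0 ∈ pre := by
              rw [hsplit, List.getD_eq_getElem _ _ (by simp; omega), List.getElem_append_left hjp]
              exact List.getElem_mem hjp
            have e1 : (decide (j < nums.length ∧ nums.getD j 0 ∈ pre)) = true :=
              decide_eq_true ⟨hjn, hmem⟩
            have e2 : (decide (j < nums.length ∧ nums.getD j 0 ∈ pre ++ [y])) = true :=
              decide_eq_true ⟨hjn, List.mem_append.mpr (Or.inl hmem)⟩
            rw [e1, e2, Bool.true_or]
          · have hle : pre.length ≤ j := by omega
            have e3 : (decide (pre.length ≤ j ∧ j < nums.length)) = true :=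
              decide_eq_true ⟨hle, hjn⟩
            rw [e3, Bool.true_and]
            by_cases hm : nums.getD j 0 ∈ pre
            · have e1 : (decide (j < nums.length ∧ nums.getD j 0 ∈ pre)) = true :=
                decide_eq_true ⟨hjn, hm⟩
              have e2 : (decide (j < nums.length ∧ nums.getD j 0 ∈ pre ++ [y])) = true :=
                decide_eq_true ⟨hjn, List.mem_append.mpr (Or.inl hm)⟩
              rw [e1, e2, Bool.true_or]
            · have e1 : (decide (j < nums.length ∧ nums.getD j 0 ∈ pre)) = false :=
                decide_eq_false (fun h => hm h.2)
              rw [e1, Bool.false_or]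
              by_cases hmy : nums.getD j 0 = y
              · have e2 : (decide (j < nums.length ∧ nums.getD j 0 ∈ pre ++ [y])) = true :=
                  decide_eq_true ⟨hjn, List.mem_append.mpr (Or.inr (List.mem_singleton.mpr hmy))⟩
                have hbeq : (y == nums.getD j 0) = true := beq_iff_eq.mpr hmy.symm
                rw [e2, hbeq]
              · have e2 : (decide (j < nums.length ∧ nums.getD j 0 ∈ pre ++ [y])) = false :=
                  decide_eq_false (fun h => by
                    rcases List.mem_append.mp h.2 with h' | h'
                    · exact hm h'
                    · exact hmy (List.mem_singleton.mp h'))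
                have hbeq : (y == nums.getD j 0) = false :=
                  beq_eq_false_iff_ne.mpr (fun h => hmy h.symm)
                rw [e2, hbeq]
        · have e1 : (decide (j < nums.length ∧ nums.getD j 0 ∈ pre)) = false :=
            decide_eq_false (fun h => hjn h.1)
          have e2 : (decide (j < nums.length ∧ nums.getD j 0 ∈ pre ++ [y])) = false :=
            decide_eq_false (fun h => hjn h.1)
          have e3 : (decide (pre.length ≤ j ∧ j < nums.length)) = false :=
            decide_eq_false (fun h => hjn h.2)
          rw [e1, e2, e3, Bool.false_and, Bool.or_false]
      have hstep : pvAOuter nums (mx, mn, v) ((pre.length : Nat) : Int) =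
          (max mx ((nums.count y : Nat) : Int), min mn ((nums.count y : Nat) : Int),
            ((PySem.List.pyRange ((pre.length : Nat) : Int) (nums.length : Int) 1).foldl
              (pvAInner nums ((pre.length : Nat) : Int)) (0, v)).2) := by
        rw [pvAOuter, htest, if_neg (by simp [hy])]
        simp only []
        rw [hcnt]
      rw [hstep, hcast]
      obtain ⟨g1, g2⟩ := ih (pre ++ [y]) _ _ _ hsplit' h2 hinv'
      rw [pvEmit, if_neg hy]
      exact ⟨g1, g2⟩

theorem a_eq_folds (nums : List Int) :
    sumHighestAndLowestFrequency nums
      = ((PySem.Set.ofList nums).map (fun x => (nums.count x : Int))).foldl max 0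
        + ((PySem.Set.ofList nums).map (fun x => (nums.count x : Int))).foldl min (nums.length : Int) := by
  unfold sumHighestAndLowestFrequency
  obtain ⟨e1, e2⟩ := outer_spec nums nums [] 0 (nums.length : Int)
    (List.replicate nums.length false) (by simp) (by simp)
    (by intro j; simp [List.getD, List.getElem?_replicate]; split <;> rfl)
  simp only [List.length_nil, Nat.cast_zero] at e1 e2
  show (List.foldl (pvAOuter nums) (0, (nums.length : Int), List.replicate nums.length false)
      (PySem.List.pyRange 0 (nums.length : Int) 1)).1
    + (List.foldl (pvAOuter nums) (0, (nums.length : Int), List.replicate nums.length false)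
      (PySem.List.pyRange 0 (nums.length : Int) 1)).2.1 = _
  rw [e1, e2, emit_eq]
  simp

theorem b_eq_folds (nums : List Int) (h : nums ≠ []) :
    sumHighestAndLowestFrequency_alt nums
      = ((PySem.Set.ofList nums).map (fun x => (nums.count x : Int))).foldl max 0
        + ((PySem.Set.ofList nums).map (fun x => (nums.count x : Int))).foldl min (nums.length : Int) := by
  unfold sumHighestAndLowestFrequency_alt
  rw [if_neg h]
  have hv : (nums.foldl (fun d x => d.insert x (d.getD x 0 + 1)) (PySem.Dict.empty : PySem.Dict Int Int)).values
      = (PySem.Set.ofList nums).map (fun x => (nums.count x : Int)) := by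
    rw [PySem.Dict.foldl_insert_getD_add_one_eq_counter]
    simp [PySem.Dict.values, PySem.Dict.items_counter, List.map_map, Function.comp]
  obtain ⟨x, t, hof⟩ : ∃ x t, PySem.Set.ofList nums = x :: t := by
    cases hof : PySem.Set.ofList nums with
    | nil =>
      cases nums with
      | nil => exact absurd rfl h
      | cons a l =>
        have ha : a ∈ PySem.Set.ofList (a :: l) := by simp [PySem.Set.mem_ofList]
        rw [hof] at ha; simp at ha
    | cons x t => exact ⟨x, t, rfl⟩
  simp only [hv, hof, List.map_cons, PySem.List.max?_id_cons, PySem.List.min?_id_cons,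
    Option.getD_some, List.foldl_cons]
  have h1 : max (0:Int) ((nums.count x : Int)) = (nums.count x : Int) :=
    max_eq_right (by positivity)
  have h2 : min ((nums.length : Int)) ((nums.count x : Int)) = (nums.count x : Int) :=
    min_eq_right (by exact_mod_cast List.count_le_length)
  rw [h1, h2]

-- ===== VERDICT (by name: the statement is the Claim_ definition above) =====
theorem sumHighestAndLowestFrequency_spec : Claim_equal_sumHighestAndLowestFrequency := by
  intro nums _
  unfold Spec_sumHighestAndLowestFrequency
  by_cases h : nums = []
  · subst h; rfl
  · rw [a_eq_folds, b_eq_folds nums h]
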